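-- pv_equiv track=rewrite | github.com/siri666666/md-zh-translator | src/md_translate_zh/markdown_processor.py | _collect_math_block_ranges
-- ===== SOURCE A (Python) =====
-- from typing import Dict, Iterable, List, Tuple
--
-- def _collect_math_block_ranges(lines: List[str]) -> List[Tuple[int, int]]:
--     ranges: List[Tuple[int, int]] = []
--     start_index: int | None = None
--
--     for idx, line in enumerate(lines):
--         if line.strip().startswith("$$"):
--             if start_index is None:
--                 start_index = idx
--             else:
--                 ranges.append((start_index, idx + 1))
--                 start_index = None
--
--     if start_index is not None:
--         ranges.append((start_index, len(lines)))
--     return ranges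
-- ===== SOURCE B (Python) =====
-- from typing import List, Tuple
--
-- def _collect_math_block_ranges(lines: List[str]) -> List[Tuple[int, int]]:
--     markers = [i for i, line in enumerate(lines) if line.strip().startswith("$$")]
--     ranges: List[Tuple[int, int]] = []
--     for j in range(0, len(markers) - 1, 2):
--         ranges.append((markers[j], markers[j + 1] + 1))
--     if len(markers) % 2 == 1:
--         ranges.append((markers[-1], len(lines)))
--     return ranges
-- ===== Notes on version B (the rewrite author's own statement) =====
-- stated objective: alternative
-- what changed: Replaces the stateful open/close toggle pass with a two-phase decomposition: first collect all indices of '$$' marker lines, then pair them two at a time (odd leftover becomes an unclosed block ending at len(lines)).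
import Mathlib
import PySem

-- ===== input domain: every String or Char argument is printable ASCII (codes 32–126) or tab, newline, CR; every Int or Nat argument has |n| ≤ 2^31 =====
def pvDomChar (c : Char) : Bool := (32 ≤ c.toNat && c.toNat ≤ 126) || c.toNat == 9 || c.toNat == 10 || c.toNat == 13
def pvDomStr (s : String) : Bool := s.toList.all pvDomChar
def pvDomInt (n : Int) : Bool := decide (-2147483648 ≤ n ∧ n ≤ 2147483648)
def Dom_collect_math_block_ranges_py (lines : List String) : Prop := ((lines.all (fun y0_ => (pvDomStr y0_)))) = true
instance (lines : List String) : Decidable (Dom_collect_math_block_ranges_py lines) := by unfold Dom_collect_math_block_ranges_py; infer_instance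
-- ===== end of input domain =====

-- ===== PORT A =====
-- B replaces A's stateful open/close toggle pass by collecting all '$$' marker
-- indices first and pairing them two at a time (alternative decomposition, same cost).

-- literal port of A's for-loop over enumerate(lines) with state (ranges, start_index)
def pvALoop : List (Int × String) → List (Int × Int) → Option Int → (List (Int × Int) × Option Int)
  | [], ranges, start => (ranges, start)
  | (idx, line) :: rest, ranges, start =>
    if PySem.Str.startswith (PySem.Str.strip line) "$$" then
      match start with
      | none => pvALoop rest ranges (some idx)
      | some s => pvALoop rest (ranges ++ [(s, idx + 1)]) none
    else
      pvALoop rest ranges start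

def collect_math_block_ranges_py (lines : List String) : List (Int × Int) :=
  match pvALoop (PySem.List.enumerate lines) [] none with
  | (ranges, none) => ranges
  | (ranges, some s) => ranges ++ [(s, (lines.length : Int))]

-- ===== PORT B =====
-- phase 1 of Source B: the list of marker line indices
def pvMarkers (lines : List String) : List Int :=
  ((PySem.List.enumerate lines).filter
    (fun p => PySem.Str.startswith (PySem.Str.strip p.2) "$$")).map Prod.fst

-- phase 2 of Source B: pair markers two at a time; an odd leftover closes at n
def pvPairUp : List Int → Int → List (Int × Int)
  | [], _ => []
  | [a], n => [(a, n)]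
  | a :: b :: rest, n => (a, b + 1) :: pvPairUp rest n

def collect_math_block_ranges_py_alt (lines : List String) : List (Int × Int) :=
  pvPairUp (pvMarkers lines) (lines.length : Int)

-- ===== PRECONDITION & SPEC =====
def Spec_collect_math_block_ranges_py (lines : List String) (out : List (Int × Int)) : Prop := out = collect_math_block_ranges_py_alt lines
instance (lines : List String) (out : List (Int × Int)) : Decidable (Spec_collect_math_block_ranges_py lines out) := by unfold Spec_collect_math_block_ranges_py; infer_instance

-- ===== CLAIM (what is proved, stated in full; the proofs are below) =====
def Claim_equal_collect_math_block_ranges_py : Prop := ∀ (lines : List String), Dom_collect_math_block_ranges_py lines → Spec_collect_math_block_ranges_py lines (collect_math_block_ranges_py lines)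

-- ===== LEMMAS AND PROOFS =====

-- finishing step of A applied to a loop state
def pvFinish : (List (Int × Int) × Option Int) → Int → List (Int × Int)
  | (ranges, none), _ => ranges
  | (ranges, some s), n => ranges ++ [(s, n)]

-- the marker indices of a remaining enumerated segment
def pvMarkersOf (ps : List (Int × String)) : List Int :=
  (ps.filter (fun p => PySem.Str.startswith (PySem.Str.strip p.2) "$$")).map Prod.fst

def pvOptList : Option Int → List Int
  | none => []
  | some s => [s]

theorem pvKey (ps : List (Int × String)) : ∀ (ranges : List (Int × Int)) (start : Option Int) (n : Int),
    pvFinish (pvALoop ps ranges start) n = ranges ++ pvPairUp (pvOptList start ++ pvMarkersOf ps) n := by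
  induction ps with
  | nil =>
    intro ranges start n
    cases start <;> simp [pvALoop, pvFinish, pvOptList, pvMarkersOf, pvPairUp]
  | cons p rest ih =>
    intro ranges start n
    obtain ⟨idx, line⟩ := p
    by_cases h : PySem.Chars.startswith (PySem.Chars.strip line.toList) ['$', '$'] = true
    · cases start with
      | none => simp [pvALoop, pvMarkersOf, pvOptList, h, ih]
      | some s => simp [pvALoop, pvMarkersOf, pvOptList, pvPairUp, h, ih]
    · cases start <;> simp [pvALoop, pvMarkersOf, pvOptList, h, ih]

theorem pvCollectEqFinish (lines : List String) :
    collect_math_block_ranges_py lines =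
      pvFinish (pvALoop (PySem.List.enumerate lines) [] none) (lines.length : Int) := by
  unfold collect_math_block_ranges_py
  rcases pvALoop (PySem.List.enumerate lines) [] none with ⟨r, _ | s⟩ <;> rfl

-- ===== VERDICT (by name: the statement is the Claim_ definition above) =====
theorem collect_math_block_ranges_py_spec : Claim_equal_collect_math_block_ranges_py := by
  intro lines _
  unfold Spec_collect_math_block_ranges_py collect_math_block_ranges_py_alt
  rw [pvCollectEqFinish, pvKey]
  simp [pvOptList, pvMarkersOf, pvMarkers]
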